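-- pv_equiv track=rewrite | github.com/rec0gn1ze/VKPhoneDumper | vkdump.py | verify_phone
-- ===== SOURCE A (Python) =====
-- def verify_phone(raw: str)-> str:
--     if len(raw) < 8:
--         return False
--
--     # return if no numbers
--     if  "1" not in raw \
--     and "2" not in raw \
--     and "3" not in raw \
--     and "4" not in raw \
--     and "5" not in raw \
--     and "6" not in raw \
--     and "7" not in raw \
--     and "8" not in raw \
--     and "9" not in raw \
--     and "0" not in raw:
--         return None
--
--     phone = ""
--     for sym in raw:
--         if sym in ['+', '-' , '(', ')', ' ', '1', '2', '3', '4', '5', '6', '7', '8', '9', '0']: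
--             if sym in ['1', '2', '3', '4', '5', '6', '7', '8', '9', '0']:
--                 phone += sym
--         else:
--             return None
--     return phone
-- ===== SOURCE B (Python) =====
-- def verify_phone(raw: str):
--     if len(raw) < 8:
--         return False
--     # Delete the separator characters; what remains must be a nonempty run of digits.
--     rest = raw.translate(str.maketrans('', '', '+-() '))
--     if rest and all('0' <= c <= '9' for c in rest):
--         return rest
--     return None
-- ===== Notes on version B (the rewrite author's own statement) =====
-- stated objective: alternative
-- what changed: Instead of A's ten digit-presence substring tests and a per-character validate-and-extract loop, B deletes the separator characters '+-() ' via str.translate and then checks the remainder is a nonempty run of digits by a range comparison, returning that remainder.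
-- outside the precondition, e.g. on verify_phone('123'): A returns False, B returns False
import Mathlib
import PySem

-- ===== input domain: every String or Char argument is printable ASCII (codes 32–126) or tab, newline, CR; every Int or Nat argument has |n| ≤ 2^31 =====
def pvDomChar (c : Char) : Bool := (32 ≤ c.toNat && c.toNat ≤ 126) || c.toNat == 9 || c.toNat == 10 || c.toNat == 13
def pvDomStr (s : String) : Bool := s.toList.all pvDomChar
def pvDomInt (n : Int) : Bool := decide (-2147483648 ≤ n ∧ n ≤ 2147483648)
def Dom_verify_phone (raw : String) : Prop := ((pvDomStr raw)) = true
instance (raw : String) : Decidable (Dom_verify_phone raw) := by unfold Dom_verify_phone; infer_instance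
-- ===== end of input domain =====

-- B deletes the separators '+-() ' and checks the remainder is a nonempty run of digits by
-- range comparison, instead of A's digit-presence tests plus validate-and-extract loop
-- (objective: alternative).
-- Pre_ excludes strings shorter than 8, where both Pythons return the bool False — not a
-- str/None value of the declared return type.

-- ===== PORT A =====
def pvDigitsA : List Char := ['1', '2', '3', '4', '5', '6', '7', '8', '9', '0']
def pvAllowedA : List Char := ['+', '-', '(', ')', ' ', '1', '2', '3', '4', '5', '6', '7', '8', '9', '0']

-- the for-loop with its early `return None`
def pvLoopA : List Char → List Char → Option (List Char)
  | [], phone => some phone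
  | sym :: rest, phone =>
    if pvAllowedA.contains sym then
      if pvDigitsA.contains sym then pvLoopA rest (phone ++ [sym]) else pvLoopA rest phone
    else none

def verify_phone (raw : String) : Option String :=
  if PySem.Str.len raw < 8 then
    none  -- Python A returns the bool False here (not a str/None); excluded by Pre_
  else if !PySem.Str.isIn "1" raw && !PySem.Str.isIn "2" raw && !PySem.Str.isIn "3" raw
       && !PySem.Str.isIn "4" raw && !PySem.Str.isIn "5" raw && !PySem.Str.isIn "6" raw
       && !PySem.Str.isIn "7" raw && !PySem.Str.isIn "8" raw && !PySem.Str.isIn "9" raw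
       && !PySem.Str.isIn "0" raw then
    none
  else
    (pvLoopA raw.toList []).map String.ofList

-- ===== PORT B =====
def pvSepB : List Char := "+-() ".toList

-- str.translate with a pure deletion table deletes exactly these characters (exact here)
def pvTranslateDel (l : List Char) : List Char := l.filter (fun c => !pvSepB.contains c)

-- '0' <= c <= '9'
def pvIsDigitRange (c : Char) : Bool := decide ('0' ≤ c) && decide (c ≤ '9')

def verify_phone_alt (raw : String) : Option String :=
  if PySem.Str.len raw < 8 then
    none  -- Python B returns the bool False here (not a str/None); excluded by Pre_
  else
    let rest := pvTranslateDel raw.toList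
    if !rest.isEmpty && rest.all pvIsDigitRange then some (String.ofList rest)
    else none

-- ===== PRECONDITION & SPEC =====
-- Pre_ excludes raw with len < 8: there A returns the bool False, outside the declared str/None return type.
def Pre_verify_phone (raw : String) : Prop := 8 ≤ PySem.Str.len raw
instance (raw : String) : Decidable (Pre_verify_phone raw) := by unfold Pre_verify_phone; infer_instance
def pvWitness_verify_phone : String := "+7 (912) 345-67-89"

def Spec_verify_phone (raw : String) (out : Option String) : Prop := out = verify_phone_alt raw
instance (raw : String) (out : Option String) : Decidable (Spec_verify_phone raw out) := by unfold Spec_verify_phone; infer_instance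

-- ===== CLAIM (what is proved, stated in full; the proofs are below) =====
def Claim_equal_verify_phone : Prop := ∀ (raw : String), Dom_verify_phone raw → Pre_verify_phone raw → Spec_verify_phone raw (verify_phone raw)

-- ===== LEMMAS AND PROOFS =====

-- A's loop computes: none if some char is not allowed, else acc ++ the digits of the list.
theorem pvLoopA_char (l acc : List Char) :
    pvLoopA l acc =
      if l.all (fun c => pvAllowedA.contains c) then
        some (acc ++ l.filter (fun c => pvDigitsA.contains c))
      else none := by
  induction l generalizing acc with
  | nil => simp [pvLoopA]
  | cons c rest ih =>
    simp only [pvLoopA, List.all_cons, List.filter_cons, ih]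
    by_cases h1 : c ∈ pvAllowedA <;> by_cases h2 : c ∈ pvDigitsA <;>
      simp [List.contains_eq_mem, h1, h2]

-- single-character substring test = char membership
theorem pvIsIn_singleton (d : Char) (s : String) :
    PySem.Str.isIn (String.ofList [d]) s = s.toList.contains d := by
  by_cases h : d ∈ s.toList
  · rw [(PySem.Str.isIn_iff_infix _ _).mpr (by
      simpa using (List.singleton_infix_iff d s.toList).mpr h)]
    simp [List.contains_eq_mem, h]
  · cases hb : PySem.Str.isIn (String.ofList [d]) s
    · simp [List.contains_eq_mem, h]
    · exact absurd ((PySem.Str.isIn_iff_infix _ _).mp hb)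
        (fun hc => h ((List.singleton_infix_iff d s.toList).mp (by simpa using hc)))

-- A's "no digit present" test ↔ the digit filter is empty
theorem pvNoDigit_iff (l : List Char) :
    ((!l.contains '1' && !l.contains '2' && !l.contains '3' && !l.contains '4'
     && !l.contains '5' && !l.contains '6' && !l.contains '7' && !l.contains '8'
     && !l.contains '9' && !l.contains '0') = true)
    ↔ l.filter (fun c => pvDigitsA.contains c) = [] := by
  simp only [Bool.and_eq_true, Bool.not_eq_true', List.contains_eq_mem, decide_eq_false_iff_not,
    List.filter_eq_nil_iff, pvDigitsA, List.contains_eq_mem, decide_eq_true_eq,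
    List.mem_cons, List.not_mem_nil]
  constructor
  · rintro ⟨⟨⟨⟨⟨⟨⟨⟨⟨h1, h2⟩, h3⟩, h4⟩, h5⟩, h6⟩, h7⟩, h8⟩, h9⟩, h0⟩ c hc hd
    rcases hd with rfl | rfl | rfl | rfl | rfl | rfl | rfl | rfl | rfl | rfl | hd
    · exact h1 hc
    · exact h2 hc
    · exact h3 hc
    · exact h4 hc
    · exact h5 hc
    · exact h6 hc
    · exact h7 hc
    · exact h8 hc
    · exact h9 hc
    · exact h0 hc
    · exact hd
  · intro h
    refine ⟨⟨⟨⟨⟨⟨⟨⟨⟨?_, ?_⟩, ?_⟩, ?_⟩, ?_⟩, ?_⟩, ?_⟩, ?_⟩, ?_⟩, ?_⟩ <;>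
      (intro hm; exact h _ hm (by simp))

-- per-character facts relating the three character classes
theorem pvDigit_range (c : Char) (h : pvDigitsA.contains c = true) : pvIsDigitRange c = true := by
  simp only [pvDigitsA, List.contains_eq_mem, decide_eq_true_eq, List.mem_cons,
    List.not_mem_nil, or_false] at h
  rcases h with rfl | rfl | rfl | rfl | rfl | rfl | rfl | rfl | rfl | rfl <;> decide

theorem pvRange_digit (c : Char) (h : pvIsDigitRange c = true) : pvDigitsA.contains c = true := by
  simp only [pvIsDigitRange, Bool.and_eq_true, decide_eq_true_eq, Char.le_def] at h
  obtain ⟨h1, h2⟩ := h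
  have hv : c.val.toNat = 48 ∨ c.val.toNat = 49 ∨ c.val.toNat = 50 ∨ c.val.toNat = 51 ∨
      c.val.toNat = 52 ∨ c.val.toNat = 53 ∨ c.val.toNat = 54 ∨ c.val.toNat = 55 ∨
      c.val.toNat = 56 ∨ c.val.toNat = 57 := by
    have h1' : (48 : Nat) ≤ c.val.toNat := h1
    have h2' : c.val.toNat ≤ 57 := h2
    omega
  have hc : ∀ (d : Char), c.val.toNat = d.val.toNat → c = d := by
    intro d hd
    exact Char.ext (UInt32.toNat_inj.mp hd)
  rcases hv with h | h | h | h | h | h | h | h | h | h <;>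
    [exact (hc '0' h) ▸ (by decide); exact (hc '1' h) ▸ (by decide);
     exact (hc '2' h) ▸ (by decide); exact (hc '3' h) ▸ (by decide);
     exact (hc '4' h) ▸ (by decide); exact (hc '5' h) ▸ (by decide);
     exact (hc '6' h) ▸ (by decide); exact (hc '7' h) ▸ (by decide);
     exact (hc '8' h) ▸ (by decide); exact (hc '9' h) ▸ (by decide)]

theorem pvRange_eq_digit (c : Char) : pvIsDigitRange c = pvDigitsA.contains c := by
  cases h : pvDigitsA.contains c
  · cases h' : pvIsDigitRange c
    · rfl
    · exact absurd (pvRange_digit c h') (by rw [h]; simp)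
  · exact pvDigit_range c h

-- allowed = separator or digit
theorem pvAllowed_split (c : Char) :
    pvAllowedA.contains c = (pvSepB.contains c || pvDigitsA.contains c) := by
  have hs : pvSepB = ['+', '-', '(', ')', ' '] := by decide
  rw [Bool.eq_iff_iff, hs]
  simp only [Bool.or_eq_true, List.contains_eq_mem, decide_eq_true_eq,
    pvAllowedA, pvDigitsA, List.mem_cons, List.not_mem_nil, or_false]
  tauto

-- digits are not separators
theorem pvDigit_not_sep (c : Char) (h : pvDigitsA.contains c = true) :
    pvSepB.contains c = false := by
  simp only [pvDigitsA, List.contains_eq_mem, decide_eq_true_eq, List.mem_cons,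
    List.not_mem_nil, or_false] at h
  rcases h with rfl | rfl | rfl | rfl | rfl | rfl | rfl | rfl | rfl | rfl <;> decide

-- ===== VERDICT (by name: the statement is the Claim_ definition above) =====
theorem verify_phone_spec : Claim_equal_verify_phone := by
  intro raw _ hpre
  have hlen : ¬ (PySem.Str.len raw < 8) := by
    unfold Pre_verify_phone at hpre; omega
  unfold Spec_verify_phone verify_phone verify_phone_alt pvTranslateDel
  rw [if_neg hlen, if_neg hlen]
  simp only [show ("1" : String) = String.ofList ['1'] from by decide,
    show ("2" : String) = String.ofList ['2'] from by decide,
    show ("3" : String) = String.ofList ['3'] from by decide,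
    show ("4" : String) = String.ofList ['4'] from by decide,
    show ("5" : String) = String.ofList ['5'] from by decide,
    show ("6" : String) = String.ofList ['6'] from by decide,
    show ("7" : String) = String.ofList ['7'] from by decide,
    show ("8" : String) = String.ofList ['8'] from by decide,
    show ("9" : String) = String.ofList ['9'] from by decide,
    show ("0" : String) = String.ofList ['0'] from by decide,
    pvIsIn_singleton]
  rw [pvLoopA_char]
  by_cases hall : raw.toList.all (fun c => pvAllowedA.contains c) = true
  · -- every character allowed: rest = the digits of raw
    have hrest : raw.toList.filter (fun c => !pvSepB.contains c)
        = raw.toList.filter (fun c => pvDigitsA.contains c) := by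
      apply List.filter_congr
      intro c hc
      have hca : pvAllowedA.contains c = true := List.all_eq_true.mp hall c hc
      rw [pvAllowed_split] at hca
      cases hd : pvDigitsA.contains c
      · simp only [hd, Bool.or_false] at hca; simp only [hca, Bool.not_true]
      · simp only [pvDigit_not_sep c hd, Bool.not_false]
    rw [if_pos hall, hrest]
    have hdig : (raw.toList.filter (fun c => pvDigitsA.contains c)).all pvIsDigitRange = true := by
      rw [List.all_eq_true]
      intro c hc
      exact pvDigit_range c (List.of_mem_filter hc)
    by_cases hempty : raw.toList.filter (fun c => pvDigitsA.contains c) = []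
    · rw [if_pos ((pvNoDigit_iff raw.toList).mpr hempty), hempty]
      simp
    · rw [if_neg (fun hcond => hempty ((pvNoDigit_iff raw.toList).mp hcond))]
      have hne : (raw.toList.filter (fun c => pvDigitsA.contains c)).isEmpty = false :=
        Bool.eq_false_iff.mpr (fun h => hempty (List.isEmpty_iff.mp h))
      simp only [hne, hdig, Bool.not_false, Bool.and_true, if_true, List.nil_append,
        Option.map_some]
  · -- some character not allowed: both sides give none
    have hall2 : ∃ c ∈ raw.toList, pvAllowedA.contains c = false := by
      by_contra hno
      exact hall (List.all_eq_true.mpr fun c hc => by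
        cases h : pvAllowedA.contains c
        · exact absurd ⟨c, hc, h⟩ hno
        · rfl)
    obtain ⟨c, hc, hbad⟩ := hall2
    rw [pvAllowed_split] at hbad
    have hsep : pvSepB.contains c = false := by
      cases h : pvSepB.contains c
      · rfl
      · rw [h] at hbad; simp at hbad
    have hdig : pvDigitsA.contains c = false := by
      cases h : pvDigitsA.contains c
      · rfl
      · rw [h] at hbad; simp at hbad
    have hmem : c ∈ raw.toList.filter (fun c => !pvSepB.contains c) :=
      List.mem_filter.mpr ⟨hc, by rw [hsep]; rfl⟩
    have hnall : (raw.toList.filter (fun c => !pvSepB.contains c)).all pvIsDigitRange = false := by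
      rw [Bool.eq_false_iff]
      intro h
      have := List.all_eq_true.mp h c hmem
      rw [pvRange_eq_digit, hdig] at this
      exact absurd this (by simp)
    simp only [hnall, Bool.and_false, Bool.false_eq_true, if_false]
    split <;> simp_all
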